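-- pv_equiv track=rewrite | github.com/gwk/pithy | pithy/seq.py | window_seq_pairs
-- ===== SOURCE A (Python) =====
-- def window_seq_pairs(seq, tail=None):
--   it = iter(seq)
--   try: head = next(it)
--   except StopIteration: return
--   for el in it:
--     yield (head, el)
--     head = el
--   yield (head, tail)
-- ===== SOURCE B (Python) =====
-- def window_seq_pairs(seq, tail=None):
--   xs = list(seq)
--   shifted = xs[1:] + [tail]
--   yield from zip(xs, shifted)
-- ===== Notes on version B (the rewrite author's own statement) =====
-- stated objective: simpler
-- what changed: B appends the tail to a shifted copy of the sequence and zips the two streams, emitting every adjacent pair uniformly, instead of A's explicit loop with a carried 'head' variable and a special final yield; the empty case falls out of zip automatically.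
import Mathlib
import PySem

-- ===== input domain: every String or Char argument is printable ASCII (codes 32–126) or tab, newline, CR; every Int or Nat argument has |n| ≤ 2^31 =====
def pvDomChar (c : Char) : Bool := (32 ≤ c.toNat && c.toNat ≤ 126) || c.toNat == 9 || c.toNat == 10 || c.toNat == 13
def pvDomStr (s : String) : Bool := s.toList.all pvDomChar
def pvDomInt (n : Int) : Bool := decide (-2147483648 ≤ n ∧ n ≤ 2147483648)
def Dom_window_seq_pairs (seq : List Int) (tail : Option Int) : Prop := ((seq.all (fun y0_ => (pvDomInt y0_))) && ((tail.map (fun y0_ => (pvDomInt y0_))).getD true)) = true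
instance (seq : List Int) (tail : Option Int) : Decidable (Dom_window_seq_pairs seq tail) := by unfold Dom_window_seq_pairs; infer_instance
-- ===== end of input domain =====

-- B zips the sequence with its shifted copy extended by the tail, replacing A's
-- carried-head loop with a special final yield (objective: simpler; return value only —
-- both Pythons are generators, compared as the list of yielded pairs).


-- ===== PORT A =====
-- the 'for el in it: yield (head, el); head = el' loop, then the final '(head, tail)'
def windowLoopA (tail : Option Int) (head : Int) : List Int → List (Int × Option Int)
  | [] => [(head, tail)]
  | el :: rest => (head, some el) :: windowLoopA tail el rest

def window_seq_pairs (seq : List Int) (tail : Option Int) : List (Int × Option Int) :=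
  match seq with
  | [] => []                       -- next(it) raises StopIteration: return
  | head :: it => windowLoopA tail head it

-- ===== PORT B =====
-- xs[1:] + [tail] zipped with xs (the int elements of xs[1:] become 'some' in the Option column)
def window_seq_pairs_alt (seq : List Int) (tail : Option Int) : List (Int × Option Int) :=
  seq.zip ((PySem.List.slice seq (some 1) none).map some ++ [tail])

-- ===== PRECONDITION & SPEC =====
def Spec_window_seq_pairs (seq : List Int) (tail : Option Int) (out : List (Int × Option Int)) : Prop := out = window_seq_pairs_alt seq tail
instance (seq : List Int) (tail : Option Int) (out : List (Int × Option Int)) : Decidable (Spec_window_seq_pairs seq tail out) := by unfold Spec_window_seq_pairs; infer_instance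

-- ===== CLAIM (what is proved, stated in full; the proofs are below) =====
def Claim_equal_window_seq_pairs : Prop := ∀ (seq : List Int) (tail : Option Int), Dom_window_seq_pairs seq tail → Spec_window_seq_pairs seq tail (window_seq_pairs seq tail)

-- ===== LEMMAS AND PROOFS =====
theorem windowLoopA_eq_zip (tail : Option Int) (rest : List Int) (head : Int) :
    windowLoopA tail head rest = (head :: rest).zip (rest.map some ++ [tail]) := by
  induction rest generalizing head with
  | nil => simp [windowLoopA]
  | cons el r ih => simp [windowLoopA, ih el]

theorem slice_from_one (seq : List Int) :
    PySem.List.slice seq (some 1) none = seq.drop 1 := by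
  simp [PySem.List.slice_from]

-- ===== VERDICT (by name: the statement is the Claim_ definition above) =====
theorem window_seq_pairs_spec : Claim_equal_window_seq_pairs := by
  intro seq tail _
  unfold Spec_window_seq_pairs window_seq_pairs window_seq_pairs_alt
  cases seq with
  | nil => simp [slice_from_one]
  | cons h t => simp [slice_from_one, windowLoopA_eq_zip]
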